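-- pv_equiv track=rewrite | github.com/JoaoCanhoto/google-foobar | level-4/4.2-running-with-bunnies/solution.py | solution
-- ===== SOURCE A (Python) =====
-- import itertools
--
-- def solution(times, time_limit):
--     def get_time(permutation):
--         permutation = [0] + list(permutation) + [-1]
--         steps = list(zip(permutation, permutation[1:]))
--         total_time = 0
--         for start, end in steps:
--             total_time += times[start][end]
--         return total_time
--
--     # do Floyd–Warshall algorithm
--     def get_fw_matrix(dist_matrix):
--         n_rows = len(dist_matrix)
--         for k in range(n_rows):
--             for i in range(n_rows):
--                 for j in range(n_rows):
--                     if dist_matrix[i][j] > dist_matrix[i][k] + dist_matrix[k][j]: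
--                         dist_matrix[i][j] = dist_matrix[i][k] + dist_matrix[k][j]
--         return dist_matrix
--
--     n_rows = len(times)
--     bunnies = len(times) - 2
--
--     # do Floyd–Warshall algorithm
--     times = get_fw_matrix(times)
--
--     # Check if there is a negative cycles (or inifinite loops)
--     # ie non zeros in the diagonal, so returning all bunnies
--     if any([times[i][i] != 0 for i in range(n_rows)]):
--         return [i for i in range(bunnies)]
--
--     for i in reversed(range(bunnies + 1)):
--         for permutation in itertools.permutations(range(1, bunnies + 1), i):
--             total_time = get_time(permutation)
--             # the permutations are already ordered by lowest id
--             if total_time <= time_limit: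
--                 return sorted(list(i - 1 for i in permutation))
--     return None
-- ===== SOURCE B (Python) =====
-- def solution(times, time_limit):
--     n = len(times)
--     # Floyd-Warshall on a copy (does not mutate the argument, unlike A)
--     dist = [row[:] for row in times]
--     for k in range(n):
--         for i in range(n):
--             for j in range(n):
--                 if dist[i][j] > dist[i][k] + dist[k][j]:
--                     dist[i][j] = dist[i][k] + dist[k][j]
--     if any(dist[i][i] != 0 for i in range(n)):
--         return list(range(n - 2))
--     memo = {}
--     def best(r, j, avail):
--         # minimal total time from node j visiting r of the bunnies in avail, then to the bulkhead
--         if r == 0: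
--             return dist[j][-1]
--         key = (j, avail, r)
--         if key not in memo:
--             memo[key] = min(dist[j][b] + best(r - 1, b, tuple(x for x in avail if x != b))
--                             for b in avail)
--         return memo[key]
--     bunnies = tuple(range(1, n - 1))
--     for r in range(n - 2, -1, -1):
--         if best(r, 0, bunnies) <= time_limit:
--             picked, c, j, avail = [], 0, 0, list(bunnies)
--             for step in range(r, 0, -1):
--                 for b in avail:
--                     if c + dist[j][b] + best(step - 1, b, tuple(x for x in avail if x != b)) <= time_limit:
--                         picked.append(b)
--                         c += dist[j][b]
--                         j = b
--                         avail.remove(b)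
--                         break
--             return sorted(x - 1 for x in picked)
--     return None
-- ===== Notes on version B (the rewrite author's own statement) =====
-- stated objective: alternative
-- what changed: Replaces A's brute-force enumeration of all permutations of every bunny subset (itertools.permutations) by a memoized Held-Karp minimum-route DP over (position, remaining-bunny-set, count) states plus a greedy reconstruction of the lexicographically first fitting permutation; the Floyd-Warshall preprocessing is kept but runs on a copy instead of mutating the argument (the shared Floyd-Warshall dominates on a timing run's inputs, so no overall speedup is claimed).
import Mathlib
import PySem

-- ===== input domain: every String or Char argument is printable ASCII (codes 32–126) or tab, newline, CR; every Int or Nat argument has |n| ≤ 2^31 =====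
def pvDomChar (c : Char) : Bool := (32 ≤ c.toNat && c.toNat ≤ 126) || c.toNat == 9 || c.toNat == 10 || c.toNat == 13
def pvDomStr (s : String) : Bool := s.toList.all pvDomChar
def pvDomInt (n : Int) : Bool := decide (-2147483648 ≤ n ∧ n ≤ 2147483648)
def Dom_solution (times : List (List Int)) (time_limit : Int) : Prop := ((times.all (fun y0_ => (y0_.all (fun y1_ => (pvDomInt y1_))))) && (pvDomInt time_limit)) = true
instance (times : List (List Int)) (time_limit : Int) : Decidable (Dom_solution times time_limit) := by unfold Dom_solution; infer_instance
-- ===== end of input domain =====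

-- B replaces A's brute force over itertools.permutations by a memoized Held-Karp minimum-route
-- DP plus greedy reconstruction (a different algorithm; no speed claim); A mutates `times` in
-- place (Floyd-Warshall), B works on a copy — the equivalence proved is about the return value.


-- ===== PORT A =====

-- times[i][j] (in-range or the Python index -1 on the admitted inputs; default never reached there)
def pvGet2 (m : List (List Int)) (i j : Int) : Int :=
  PySem.List.pyGetD (PySem.List.pyGetD m i []) j 0

-- times[i][j] = v (i, j are nonnegative wherever this is called)
def pvSet2 (m : List (List Int)) (i j : Int) (v : Int) : List (List Int) :=
  m.set i.toNat ((PySem.List.pyGetD m i []).set j.toNat v)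

-- get_fw_matrix: Floyd-Warshall; Python mutates the list in place, the state is threaded here
def pvFW (times : List (List Int)) : List (List Int) :=
  (PySem.List.pyRange 0 (times.length : Int) 1).foldl (fun m k =>
    (PySem.List.pyRange 0 (times.length : Int) 1).foldl (fun m i =>
      (PySem.List.pyRange 0 (times.length : Int) 1).foldl (fun m j =>
        if pvGet2 m i j > pvGet2 m i k + pvGet2 m k j then
          pvSet2 m i j (pvGet2 m i k + pvGet2 m k j) else m) m) m) times

-- get_time: [0] + permutation + [-1], zip with its tail, sum the matrix entries
def pvGetTime (t : List (List Int)) (p : List Int) : Int :=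
  let path := 0 :: p ++ [-1]
  (path.zip (path.drop 1)).foldl (fun acc s => acc + pvGet2 t s.1 s.2) 0

def solution (times : List (List Int)) (time_limit : Int) : Option (List Int) :=
  let nRows : Int := times.length
  let bunnies : Int := nRows - 2
  let t := pvFW times
  if (PySem.List.pyRange 0 nRows 1).any (fun i => pvGet2 t i i != 0) then
    some (PySem.List.pyRange 0 bunnies 1)
  else
    (PySem.List.pyRange 0 (bunnies + 1) 1).reverse.findSome? (fun i =>
      (PySem.List.permutations (PySem.List.pyRange 1 (bunnies + 1) 1) i.toNat).findSome?
        (fun p =>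
          if pvGetTime t p ≤ time_limit then
            some (PySem.List.sorted (p.map (fun x => x - 1)) (fun x => x) false)
          else none))

-- ===== PORT B =====

abbrev pvMemo := PySem.Dict (Int × List Int × Int) Int

-- best(r, j, avail) with the dict `memo` threaded through (Python mutates one dict)
def pvBestM (t : List (List Int)) : Nat → Int → List Int → pvMemo → Int × pvMemo
  | 0, j, _, mo => (pvGet2 t j (-1), mo)
  | r + 1, j, V, mo =>
    let key : Int × List Int × Int := (j, V, (r : Int) + 1)
    match PySem.Dict.get? mo key with
    | some v => (v, mo)
    | none =>
      let st := V.foldl (fun (st : Option Int × pvMemo) b =>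
        let res := pvBestM t r b (V.filter (fun x => x != b)) st.2
        let c := pvGet2 t j b + res.1
        (match st.1 with
         | none => some c
         | some a => some (min a c), res.2)) (none, mo)
      let v := st.1.getD 0   -- Python's min over the nonempty generator (V ≠ [] wherever called)
      (v, PySem.Dict.insert st.2 key v)

-- the inner `for b in avail: ... break` of the reconstruction loop
def pvScan (t : List (List Int)) (tl : Int) (step : Nat) (c j : Int) (avail : List Int) :
    List Int → pvMemo → Option Int × pvMemo
  | [], mo => (none, mo)
  | b :: bs, mo =>
    let res := pvBestM t step b (avail.filter (fun x => x != b)) mo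
    if c + pvGet2 t j b + res.1 ≤ tl then (some b, res.2)
    else pvScan t tl step c j avail bs res.2

-- the `for step in range(r, 0, -1)` reconstruction loop (picked/c/j/avail as parameters)
def pvRecon (t : List (List Int)) (tl : Int) : Nat → Int → Int → List Int → pvMemo →
    List Int × pvMemo
  | 0, _, _, _, mo => ([], mo)
  | step + 1, j, c, avail, mo =>
    match pvScan t tl step c j avail avail mo with
    | (some b, mo') =>
      let res := pvRecon t tl step b (c + pvGet2 t j b) (avail.erase b) mo'
      (b :: res.1, res.2)
    | (none, mo') => pvRecon t tl step j c avail mo'  -- inner loop found nothing: continue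

-- the `for r in range(n - 2, -1, -1)` loop
def pvAltLoop (t : List (List Int)) (tl : Int) (bunnies : List Int) :
    List Int → pvMemo → Option (List Int)
  | [], _ => none
  | r :: rs, mo =>
    let res := pvBestM t r.toNat 0 bunnies mo
    if res.1 ≤ tl then
      let rec0 := pvRecon t tl r.toNat 0 0 bunnies res.2
      some (PySem.List.sorted (rec0.1.map (fun x => x - 1)) (fun x => x) false)
    else pvAltLoop t tl bunnies rs res.2

def solution_alt (times : List (List Int)) (time_limit : Int) : Option (List Int) :=
  let n : Int := times.length
  let dist := pvFW times   -- Python B first copies the rows; functionally the same matrix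
  if (PySem.List.pyRange 0 n 1).any (fun i => pvGet2 dist i i != 0) then
    some (PySem.List.pyRange 0 (n - 2) 1)
  else
    pvAltLoop dist time_limit (PySem.List.pyRange 1 (n - 1) 1)
      (PySem.List.pyRange (n - 2) (-1) (-1)) PySem.Dict.empty

-- ===== PRECONDITION & SPEC =====

-- Pre_ excludes exactly the ragged matrices with a row shorter than len(times), on which
-- Python A raises IndexError inside Floyd-Warshall / get_time; A returns normally otherwise.
def Pre_solution (times : List (List Int)) (time_limit : Int) : Prop :=
  ∀ row ∈ times, times.length ≤ row.length

instance (times : List (List Int)) (time_limit : Int) : Decidable (Pre_solution times time_limit) := by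
  unfold Pre_solution; infer_instance

def pvWitness_solution : List (List Int) × Int := ([[0, 1], [1, 0]], 1)

def Spec_solution (times : List (List Int)) (time_limit : Int) (out : Option (List Int)) : Prop :=
  out = solution_alt times time_limit

instance (times : List (List Int)) (time_limit : Int) (out : Option (List Int)) :
    Decidable (Spec_solution times time_limit out) := by unfold Spec_solution; infer_instance

-- ===== CLAIM (what is proved, stated in full; the proofs are below) =====
def Claim_equal_solution : Prop := ∀ (times : List (List Int)) (time_limit : Int), Dom_solution times time_limit → Pre_solution times time_limit → Spec_solution times time_limit (solution times time_limit)

-- ===== LEMMAS AND PROOFS =====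

-- ---- pure specification layer: permutations, path cost, minimal completion cost, greedy ----

def permsE : Nat → List Int → List (List Int)
  | 0, _ => [[]]
  | r + 1, V => V.flatMap (fun b => (permsE r (V.filter (fun x => x != b))).map (b :: ·))

def costF (t : List (List Int)) : Int → List Int → Int
  | j, [] => pvGet2 t j (-1)
  | j, b :: p => pvGet2 t j b + costF t b p

def bestP (t : List (List Int)) : Nat → Int → List Int → Int
  | 0, j, _ => pvGet2 t j (-1)
  | r + 1, j, V =>
    ((V.map (fun b => pvGet2 t j b + bestP t r b (V.filter (fun x => x != b)))).min?).getD 0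

def greedyP (t : List (List Int)) (tl : Int) : Nat → Int → Int → List Int → List Int
  | 0, _, _, _ => []
  | r + 1, j, c, V =>
    match V.find? (fun b => c + pvGet2 t j b + bestP t r b (V.filter (fun x => x != b)) ≤ tl) with
    | some b => b :: greedyP t tl r b (c + pvGet2 t j b) (V.filter (fun x => x != b))
    | none => []

theorem getTime_aux (t : List (List Int)) (p : List Int) (j acc : Int) :
    (((j :: (p ++ [-1])).zip (p ++ [-1])).foldl (fun acc s => acc + pvGet2 t s.1 s.2) acc)
      = acc + costF t j p := by
  induction p generalizing j acc with
  | nil => simp [costF, List.zip]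
  | cons b q ih =>
    simp only [List.cons_append, List.zip_cons_cons, List.foldl_cons, costF]
    rw [ih b (acc + pvGet2 t j b)]; ring

theorem costF_getTime (t : List (List Int)) (p : List Int) : pvGetTime t p = costF t 0 p := by
  simpa [pvGetTime] using getTime_aux t p 0 0

theorem filter_ne_middle (pre t : List Int) (x : Int) (h : (pre ++ x :: t).Nodup) :
    (pre ++ x :: t).filter (fun y => y != x) = pre ++ t := by
  have hx : x ∉ pre ++ t := (List.nodup_cons.mp (List.nodup_middle.mp h)).1
  have h1 : pre.filter (fun y => y != x) = pre :=
    List.filter_eq_self.mpr (fun a ha => by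
      simp only [bne_iff_ne, ne_eq]
      intro e; exact hx (e ▸ List.mem_append_left t ha))
  have h2 : t.filter (fun y => y != x) = t :=
    List.filter_eq_self.mpr (fun a ha => by
      simp only [bne_iff_ne, ne_eq]
      intro e; exact hx (e ▸ List.mem_append_right pre ha))
  rw [List.filter_append, List.filter_cons]
  simp [h1, h2]

theorem permutations_succ (xs : List Int) (r : Nat) :
    PySem.List.permutations xs (r + 1)
      = (List.range xs.length).flatMap (fun i => match xs[i]? with
        | none => []
        | some b => (PySem.List.permutations (xs.eraseIdx i) r).map (b :: ·)) := by
  rw [PySem.List.permutations]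
  apply List.flatMap_congr
  intro i hi
  cases h : xs[i]? <;> simp

theorem idx_flatMap_gen {β : Type} (H : Int → List Int → List β) :
    ∀ (xs pre : List Int), (pre ++ xs).Nodup →
    (List.range xs.length).flatMap (fun i => match xs[i]? with
       | none => []
       | some b => H b (pre ++ xs.eraseIdx i))
    = xs.flatMap (fun b => H b ((pre ++ xs).filter (fun x => x != b))) := by
  intro xs
  induction xs with
  | nil => intro pre _; rfl
  | cons x t ih =>
    intro pre h
    rw [List.length_cons, List.range_succ_eq_map, List.flatMap_cons, List.flatMap_cons,
      List.flatMap_map]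
    congr 1
    · simp only [List.getElem?_cons_zero, List.eraseIdx_cons_zero]
      rw [filter_ne_middle pre t x h]
    · have ih' := ih (pre ++ [x]) (by simpa using h)
      have hcast : ∀ i : Nat, (fun i => match (x :: t)[i]? with
            | none => ([] : List β)
            | some b => H b (pre ++ (x :: t).eraseIdx i)) (Nat.succ i)
          = (fun i => match t[i]? with
            | none => []
            | some b => H b ((pre ++ [x]) ++ t.eraseIdx i)) i := by
        intro i
        simp only [List.getElem?_cons_succ, List.eraseIdx_cons_succ, List.append_assoc,
          List.singleton_append]
      calc (List.range t.length).flatMap (fun i => (fun i => match (x :: t)[i]? with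
              | none => ([] : List β)
              | some b => H b (pre ++ (x :: t).eraseIdx i)) (Nat.succ i))
          = (List.range t.length).flatMap (fun i => match t[i]? with
              | none => []
              | some b => H b ((pre ++ [x]) ++ t.eraseIdx i)) := by
            exact List.flatMap_congr (fun i _ => hcast i)
        _ = t.flatMap (fun b => H b (((pre ++ [x]) ++ t).filter (fun y => y != b))) := ih'
        _ = t.flatMap (fun b => H b ((pre ++ x :: t).filter (fun y => y != b))) := by
            simp [List.append_assoc]

theorem permutations_eq_permsE (r : Nat) (xs : List Int) (h : xs.Nodup) :
    PySem.List.permutations xs r = permsE r xs := by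
  induction r generalizing xs with
  | zero => rw [PySem.List.permutations]; rw [permsE]
  | succ r ih =>
    rw [permutations_succ]
    have hcg : ∀ i ∈ List.range xs.length,
        (match xs[i]? with
         | none => ([] : List (List Int))
         | some b => (PySem.List.permutations (xs.eraseIdx i) r).map (b :: ·))
        = (match xs[i]? with
         | none => []
         | some b => (permsE r (xs.eraseIdx i)).map (b :: ·)) := by
      intro i hi
      have hi' : i < xs.length := List.mem_range.mp hi
      rw [List.getElem?_eq_getElem hi']
      simp only
      rw [ih (xs.eraseIdx i) (h.eraseIdx i)]
    rw [List.flatMap_congr hcg]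
    have := idx_flatMap_gen (fun b l => (permsE r l).map (b :: ·)) xs [] (by simpa using h)
    simpa using this

theorem min?_getD_le_int {l : List Int} {a : Int} (h : a ∈ l) (k : Int) :
    l.min?.getD k ≤ a := by
  cases hm : l.min? with
  | none => rw [List.min?_eq_none_iff] at hm; subst hm; simp at h
  | some m => exact (List.min?_eq_some_iff.mp hm).2 a h

theorem bestP_le (t : List (List Int)) (r : Nat) (V : List Int) (j : Int) (p : List Int)
    (hp : p ∈ permsE r V) : bestP t r j V ≤ costF t j p := by
  induction r generalizing V j p with
  | zero =>
    simp only [permsE, List.mem_singleton] at hp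
    subst hp; simp [bestP, costF]
  | succ r ih =>
    simp only [permsE, List.mem_flatMap, List.mem_map] at hp
    obtain ⟨b, hbV, q, hq, rfl⟩ := hp
    have h1 : bestP t (r + 1) j V
        ≤ pvGet2 t j b + bestP t r b (V.filter (fun x => x != b)) := by
      simp only [bestP]
      exact min?_getD_le_int (List.mem_map_of_mem hbV) 0
    have h2 := ih (V.filter (fun x => x != b)) b q hq
    simp only [costF]
    omega

theorem findSome_none (t : List (List Int)) (tl : Int) (r : Nat) (V : List Int) (j c : Int)
    (h : tl < c + bestP t r j V) :
    (permsE r V).findSome? (fun p => if c + costF t j p ≤ tl then some p else none) = none := by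
  rw [List.findSome?_eq_none_iff]
  intro p hp
  have := bestP_le t r V j p hp
  rw [if_neg (by omega)]


theorem findSome?_pull {α β γ : Type} (l : List α) (h : α → Option β) (g : β → γ) :
    l.findSome? (fun x => (h x).map g) = (l.findSome? h).map g := by
  induction l with
  | nil => rfl
  | cons a l ih => simp only [List.findSome?_cons]; cases h a <;> simp [ih]

theorem exists_feasible (t : List (List Int)) (tl : Int) (r : Nat) (V : List Int) (j c : Int)
    (h : c + bestP t (r + 1) j V ≤ tl) (hne : V ≠ []) :
    (V.find? (fun b =>
      c + pvGet2 t j b + bestP t r b (V.filter (fun x => x != b)) ≤ tl)).isSome := by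
  by_contra hc
  rw [Option.not_isSome_iff_eq_none, List.find?_eq_none] at hc
  have hne' : V.map (fun b => pvGet2 t j b + bestP t r b (V.filter (fun x => x != b))) ≠ [] := by
    simpa using hne
  obtain ⟨m, hm⟩ := Option.ne_none_iff_exists'.mp
    (fun hnone => hne' (List.min?_eq_none_iff.mp hnone))
  obtain ⟨b, hbV, hfb⟩ := List.mem_map.mp (List.min?_mem hm)
  have hb := hc b hbV
  have hval : bestP t (r + 1) j V = m := by simp [bestP, hm]
  simp only [decide_eq_true_eq] at hb
  omega

theorem findSome_greedy (t : List (List Int)) (tl : Int) (r : Nat) (V : List Int)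
    (hN : V.Nodup) (hr : r ≤ V.length) (j c : Int) (h : c + bestP t r j V ≤ tl) :
    (permsE r V).findSome? (fun p => if c + costF t j p ≤ tl then some p else none)
      = some (greedyP t tl r j c V) := by
  induction r generalizing V j c with
  | zero =>
    have hc : c + costF t j [] ≤ tl := by simpa [bestP, costF] using h
    simp [permsE, greedyP, hc]
  | succ r ih =>
    have hVne : V ≠ [] := by intro e; subst e; simp at hr
    have aux : ∀ (W : List Int), (∀ b ∈ W, b ∈ V) →
        (W.flatMap (fun b => (permsE r (V.filter (fun x => x != b))).map (b :: ·))).findSome?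
            (fun p => if c + costF t j p ≤ tl then some p else none)
          = match W.find? (fun b =>
                c + pvGet2 t j b + bestP t r b (V.filter (fun x => x != b)) ≤ tl) with
            | some b => some (b :: greedyP t tl r b (c + pvGet2 t j b)
                (V.filter (fun x => x != b)))
            | none => none := by
      intro W
      induction W with
      | nil => intro _; rfl
      | cons b W' ihW =>
        intro hsub
        have hbV : b ∈ V := hsub b List.mem_cons_self
        have hlen : (V.filter (fun x => x != b)).length = V.length - 1 := by
          rw [← List.Nodup.erase_eq_filter hN b]; exact List.length_erase_of_mem hbV
        rw [List.flatMap_cons, List.findSome?_append]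
        have hhead : ((permsE r (V.filter (fun x => x != b))).map (b :: ·)).findSome?
              (fun p => if c + costF t j p ≤ tl then some p else none)
            = (if c + pvGet2 t j b + bestP t r b (V.filter (fun x => x != b)) ≤ tl
               then some (b :: greedyP t tl r b (c + pvGet2 t j b)
                 (V.filter (fun x => x != b)))
               else none) := by
          rw [List.findSome?_map]
          have heq : ((fun p => if c + costF t j p ≤ tl then some p else none) ∘ (b :: ·))
              = fun q => (if (c + pvGet2 t j b) + costF t b q ≤ tl
                  then some q else none).map (b :: ·) := by
            funext q
            simp only [Function.comp, costF]
            by_cases hq : c + (pvGet2 t j b + costF t b q) ≤ tl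
            · rw [if_pos hq, if_pos (by omega)]; rfl
            · rw [if_neg hq, if_neg (by omega)]; rfl
          rw [heq, findSome?_pull]
          by_cases hb : c + pvGet2 t j b + bestP t r b (V.filter (fun x => x != b)) ≤ tl
          · rw [if_pos hb,
              ih (V.filter (fun x => x != b)) (hN.filter _) (by omega) b
                (c + pvGet2 t j b) (by omega)]
            rfl
          · rw [if_neg hb,
              findSome_none t tl r (V.filter (fun x => x != b)) b (c + pvGet2 t j b)
                (by omega)]
            rfl
        rw [hhead]
        by_cases hb : c + pvGet2 t j b + bestP t r b (V.filter (fun x => x != b)) ≤ tl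
        · rw [if_pos hb, List.find?_cons_of_pos (by simpa using hb)]
          simp
        · rw [if_neg hb, List.find?_cons_of_neg (by simpa using hb)]
          simpa using ihW (fun x hx => hsub x (List.mem_cons_of_mem b hx))
    rw [show permsE (r + 1) V
        = V.flatMap (fun b => (permsE r (V.filter (fun x => x != b))).map (b :: ·)) from rfl,
      aux V (fun _ hb => hb)]
    obtain ⟨b, hb⟩ := Option.isSome_iff_exists.mp (exists_feasible t tl r V j c h hVne)
    rw [hb]
    simp only [greedyP]
    rw [hb]

def GoodM (t : List (List Int)) (mo : pvMemo) : Prop :=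
  ∀ (j : Int) (V : List Int) (ri : Int) (v : Int),
    PySem.Dict.get? mo (j, V, ri) = some v → v = bestP t ri.toNat j V

theorem foldl_minacc_some (g : Int → Int) (W : List Int) (a : Int) :
    W.foldl (fun acc b => match acc with
      | none => some (g b)
      | some x => some (min x (g b))) (some a) = some ((W.map g).foldl min a) := by
  induction W generalizing a with
  | nil => rfl
  | cons b W ih => simp only [List.foldl_cons, List.map_cons]; exact ih (min a (g b))

theorem foldl_minacc_none (g : Int → Int) (W : List Int) :
    (W.foldl (fun acc b => match acc with
      | none => some (g b)
      | some x => some (min x (g b))) none).getD 0 = ((W.map g).min?).getD 0 := by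
  cases W with
  | nil => rfl
  | cons b W => simp only [List.foldl_cons, List.map_cons, foldl_minacc_some, List.min?_cons']

theorem bestM_correct (t : List (List Int)) (r : Nat) (j : Int) (V : List Int) (mo : pvMemo)
    (hG : GoodM t mo) :
    (pvBestM t r j V mo).1 = bestP t r j V ∧ GoodM t (pvBestM t r j V mo).2 := by
  induction r generalizing j V mo with
  | zero => exact ⟨rfl, hG⟩
  | succ r ih =>
    simp only [pvBestM]
    cases hk : PySem.Dict.get? mo (j, V, (r : Int) + 1) with
    | some v =>
      refine ⟨?_, hG⟩
      have := hG j V ((r : Int) + 1) v hk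
      simpa using this
    | none =>
      have hfold : ∀ (W : List Int) (a : Option Int) (mo' : pvMemo), GoodM t mo' →
          GoodM t ((W.foldl (fun (st : Option Int × pvMemo) b =>
              let res := pvBestM t r b (V.filter (fun x => x != b)) st.2
              let c := pvGet2 t j b + res.1
              (match st.1 with
               | none => some c
               | some a => some (min a c), res.2)) (a, mo')).2)
          ∧ (W.foldl (fun (st : Option Int × pvMemo) b =>
              let res := pvBestM t r b (V.filter (fun x => x != b)) st.2
              let c := pvGet2 t j b + res.1
              (match st.1 with
               | none => some c
               | some a => some (min a c), res.2)) (a, mo')).1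
            = W.foldl (fun acc b => match acc with
                | none => some (pvGet2 t j b + bestP t r b (V.filter (fun x => x != b)))
                | some x => some (min x (pvGet2 t j b + bestP t r b (V.filter (fun x => x != b))))) a := by
        intro W
        induction W with
        | nil => intro a mo' hG'; exact ⟨hG', rfl⟩
        | cons b W ihW =>
          intro a mo' hG'
          simp only [List.foldl_cons]
          obtain ⟨hv, hg⟩ := ih b (V.filter (fun x => x != b)) mo' hG'
          rw [hv]
          exact ihW _ _ hg
      obtain ⟨hG2, hval⟩ := hfold V none mo hG
      have hvv : ((V.foldl (fun (st : Option Int × pvMemo) b =>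
            let res := pvBestM t r b (V.filter (fun x => x != b)) st.2
            let c := pvGet2 t j b + res.1
            (match st.1 with
             | none => some c
             | some a => some (min a c), res.2)) ((none : Option Int), mo)).1).getD 0
          = bestP t (r + 1) j V := by
        rw [hval, foldl_minacc_none]; rfl
      constructor
      · exact hvv
      · intro j' V' ri v hv
        by_cases hkey : ((j', V', ri) : Int × List Int × Int) = (j, V, (r : Int) + 1)
        · obtain ⟨rfl, rfl, rfl⟩ : j' = j ∧ V' = V ∧ ri = (r : Int) + 1 := by
            simpa [Prod.ext_iff] using hkey
          rw [PySem.Dict.get?_insert_self] at hv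
          have hv' := Option.some_injective _ hv
          have htn : ((r : Int) + 1).toNat = r + 1 := by omega
          rw [htn, ← hv']
          exact hvv
        · rw [PySem.Dict.get?_insert_of_ne _ _ hkey] at hv
          exact hG2 j' V' ri v hv

theorem scan_correct (t : List (List Int)) (tl : Int) (step : Nat) (c j : Int)
    (avail : List Int) (bs : List Int) (mo : pvMemo) (hG : GoodM t mo) :
    (pvScan t tl step c j avail bs mo).1
        = bs.find? (fun b => c + pvGet2 t j b + bestP t step b (avail.filter (fun x => x != b)) ≤ tl)
      ∧ GoodM t (pvScan t tl step c j avail bs mo).2 := by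
  induction bs generalizing mo with
  | nil => exact ⟨rfl, hG⟩
  | cons b bs ih =>
    simp only [pvScan]
    obtain ⟨hv, hg⟩ := bestM_correct t step b (avail.filter (fun x => x != b)) mo hG
    rw [hv]
    by_cases hb : c + pvGet2 t j b + bestP t step b (avail.filter (fun x => x != b)) ≤ tl
    · rw [if_pos hb, List.find?_cons_of_pos (by simpa using hb)]
      exact ⟨rfl, hg⟩
    · rw [if_neg hb, List.find?_cons_of_neg (by simpa using hb)]
      exact ih _ hg

theorem recon_correct (t : List (List Int)) (tl : Int) (step : Nat) (j c : Int)
    (avail : List Int) (mo : pvMemo) (hG : GoodM t mo) (hN : avail.Nodup)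
    (hs : step ≤ avail.length) (h : c + bestP t step j avail ≤ tl) :
    (pvRecon t tl step j c avail mo).1 = greedyP t tl step j c avail
      ∧ GoodM t (pvRecon t tl step j c avail mo).2 := by
  induction step generalizing j c avail mo with
  | zero => exact ⟨rfl, hG⟩
  | succ step ihs =>
    have hne : avail ≠ [] := by intro e; subst e; simp at hs
    obtain ⟨hfind, hg2⟩ := scan_correct t tl step c j avail avail mo hG
    obtain ⟨b, hex⟩ := Option.isSome_iff_exists.mp
      (exists_feasible t tl step avail j c h hne)
    have hbmem : b ∈ avail := List.mem_of_find?_eq_some hex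
    have hpred : c + pvGet2 t j b + bestP t step b (avail.filter (fun x => x != b)) ≤ tl := by
      simpa using List.find?_some hex
    have hef : avail.erase b = avail.filter (fun x => x != b) := List.Nodup.erase_eq_filter hN b
    have hlen : (avail.filter (fun x => x != b)).length = avail.length - 1 := by
      rw [← hef]; exact List.length_erase_of_mem hbmem
    simp only [pvRecon]
    rcases hsceq : pvScan t tl step c j avail avail mo with ⟨o, mo2⟩
    rw [hsceq] at hfind hg2
    simp only at hfind hg2
    rw [hfind, hex]
    simp only [greedyP]
    rw [hex, hef]
    obtain ⟨h1, h2⟩ := ihs b (c + pvGet2 t j b) (avail.filter (fun x => x != b)) mo2 hg2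
      (hN.filter _) (by omega) (by omega)
    exact ⟨by rw [h1], h2⟩

theorem altLoop_eq (t : List (List Int)) (tl : Int) (V : List Int) (hN : V.Nodup)
    (is : List Int) (mo : pvMemo) (hG : GoodM t mo)
    (hb : ∀ i ∈ is, 0 ≤ i ∧ i.toNat ≤ V.length) :
    pvAltLoop t tl V is mo
      = is.findSome? (fun i => (permsE i.toNat V).findSome? (fun p =>
          if costF t 0 p ≤ tl then
            some (PySem.List.sorted (p.map (fun x => x - 1)) (fun x => x) false)
          else none)) := by
  induction is generalizing mo with
  | nil => rfl
  | cons r rs ih =>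
    have hmapfn : (fun p => if costF t 0 p ≤ tl then
          some (PySem.List.sorted (p.map (fun x => x - 1)) (fun x => x) false) else none)
        = fun p : List Int => (if 0 + costF t 0 p ≤ tl then some p else none).map
            (fun p => PySem.List.sorted (p.map (fun x => x - 1)) (fun x => x) false) := by
      funext p
      by_cases hp : costF t 0 p ≤ tl
      · rw [if_pos hp, if_pos (by omega)]; rfl
      · rw [if_neg hp, if_neg (by omega)]; rfl
    obtain ⟨hr0, hb0⟩ := hb r List.mem_cons_self
    obtain ⟨hv, hg⟩ := bestM_correct t r.toNat 0 V mo hG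
    have hheadmap : (permsE r.toNat V).findSome? (fun p => if costF t 0 p ≤ tl then
          some (PySem.List.sorted (p.map (fun x => x - 1)) (fun x => x) false) else none)
        = ((permsE r.toNat V).findSome? (fun p =>
            if 0 + costF t 0 p ≤ tl then some p else none)).map
              (fun p => PySem.List.sorted (p.map (fun x => x - 1)) (fun x => x) false) := by
      rw [hmapfn, findSome?_pull]
    simp only [pvAltLoop]
    rw [hv, List.findSome?_cons, hheadmap]
    by_cases hle : bestP t r.toNat 0 V ≤ tl
    · rw [if_pos hle, findSome_greedy t tl r.toNat V hN hb0 0 0 (by omega)]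
      obtain ⟨h1, _⟩ := recon_correct t tl r.toNat 0 0 V (pvBestM t r.toNat 0 V mo).2 hg hN hb0
        (by omega)
      rw [h1]
      rfl
    · rw [if_neg hle, findSome_none t tl r.toNat V 0 0 (by omega)]
      exact ih _ hg (fun i hi => hb i (List.mem_cons_of_mem r hi))

-- ===== VERDICT (by name: the statement is the Claim_ definition above) =====
theorem findSome?_congr' {α β : Type} {l : List α} {f g : α → Option β}
    (h : ∀ x ∈ l, f x = g x) : l.findSome? f = l.findSome? g := by
  induction l with
  | nil => rfl
  | cons a l ih =>
    simp only [List.findSome?_cons, h a List.mem_cons_self]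
    cases g a with
    | some b => rfl
    | none => exact ih (fun x hx => h x (List.mem_cons_of_mem a hx))

theorem goodM_empty (t : List (List Int)) : GoodM t PySem.Dict.empty := by
  intro j V ri v hv
  rw [PySem.Dict.get?_empty] at hv
  cases hv

theorem solution_spec : Claim_equal_solution := by
  unfold Claim_equal_solution
  intro times tl _ _
  unfold Spec_solution solution solution_alt
  simp only []
  by_cases hd : (PySem.List.pyRange 0 (times.length : Int) 1).any
      (fun i => pvGet2 (pvFW times) i i != 0)
  · rw [if_pos hd, if_pos hd]
  · rw [if_neg hd, if_neg hd]
    have harith : (times.length : Int) - 2 + 1 = (times.length : Int) - 1 := by ring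
    rw [harith]
    have hlist : PySem.List.pyRange ((times.length : Int) - 2) (-1) (-1)
        = (PySem.List.pyRange 0 ((times.length : Int) - 1) 1).reverse := by
      rw [PySem.List.pyRange_neg_one_eq_reverse]
      norm_num
      rw [harith]
    rw [hlist]
    have hNod : (PySem.List.pyRange 1 ((times.length : Int) - 1) 1).Nodup :=
      PySem.List.nodup_pyRange_one 1 _
    have hbounds : ∀ i ∈ (PySem.List.pyRange 0 ((times.length : Int) - 1) 1).reverse,
        0 ≤ i ∧ i.toNat ≤ (PySem.List.pyRange 1 ((times.length : Int) - 1) 1).length := by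
      intro i hi
      rw [List.mem_reverse, PySem.List.mem_pyRange_one] at hi
      rw [PySem.List.length_pyRange_one]
      omega
    rw [altLoop_eq (pvFW times) tl (PySem.List.pyRange 1 ((times.length : Int) - 1) 1) hNod
      ((PySem.List.pyRange 0 ((times.length : Int) - 1) 1).reverse) PySem.Dict.empty
      (goodM_empty (pvFW times)) hbounds]
    apply findSome?_congr'
    intro i _
    rw [permutations_eq_permsE _ _ hNod]
    simp only [costF_getTime]
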